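-- pv_equiv track=rewrite | github.com/Insightpulseai/odoo | odoo/odoo/packages/odoo-docs-kb/chunker.py | _strip_toctree
-- ===== SOURCE A (Python) =====
-- def _strip_toctree(text: str) -> str:
--     """Remove toctree directives."""
--     lines = text.split("\n")
--     result = []
--     skip_indent = None
--
--     for line in lines:
--         stripped = line.lstrip()
--         if skip_indent is not None:
--             if line == "" or (len(line) - len(stripped) > skip_indent):
--                 continue
--             else:
--                 skip_indent = None
--
--         if stripped.startswith(".. toctree::"):
--             skip_indent = len(line) - len(stripped)
--             continue
--
--         result.append(line)
--
--     return "\n".join(result)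
-- ===== SOURCE B (Python) =====
-- def _strip_toctree(text: str) -> str:
--     """Remove toctree directives."""
--     lines = text.split("\n")
--     n = len(lines)
--     dropped = set()
--     for i in range(n):
--         if i in dropped:
--             continue
--         line = lines[i]
--         stripped = line.lstrip()
--         if stripped.startswith(".. toctree::"):
--             dropped.add(i)
--             indent = len(line) - len(stripped)
--             j = i + 1
--             while j < n and (lines[j] == "" or len(lines[j]) - len(lines[j].lstrip()) > indent):
--                 dropped.add(j)
--                 j += 1
--     return "\n".join(lines[i] for i in range(n) if i not in dropped)
-- ===== Notes on version B (the rewrite author's own statement) =====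
-- stated objective: alternative
-- what changed: Instead of A's single fold that decides keep/drop per line with a carried skip_indent flag, B first builds a set of dropped line indices (each marker plus its blank/more-indented block) and then reconstructs the output by filtering the index range against that set.
import Mathlib
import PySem

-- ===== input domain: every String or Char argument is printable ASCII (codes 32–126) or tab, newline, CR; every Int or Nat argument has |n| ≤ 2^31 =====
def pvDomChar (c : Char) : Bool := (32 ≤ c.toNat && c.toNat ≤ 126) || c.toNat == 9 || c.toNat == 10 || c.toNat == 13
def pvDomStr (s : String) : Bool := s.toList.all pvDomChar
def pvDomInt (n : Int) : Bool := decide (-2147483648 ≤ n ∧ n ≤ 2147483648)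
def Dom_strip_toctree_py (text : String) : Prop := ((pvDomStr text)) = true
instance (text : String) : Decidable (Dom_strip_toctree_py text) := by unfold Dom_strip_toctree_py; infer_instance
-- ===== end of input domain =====

-- B replaces A's fold with a carried skip_indent flag by first computing the SET of dropped line
-- indices and then filtering the index range against it (objective: alternative decomposition).

-- ===== PORT A =====
-- A's loop body: state = (result, skip_indent)
def stripToctreeStep (st : List String × Option Int) (line : String) : List String × Option Int :=
  let stripped := PySem.Str.lstrip line
  match st.2 with
  | some skip =>
    if line = "" ∨ PySem.Str.len line - PySem.Str.len stripped > skip then st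
    else  -- skip_indent = None; fall through to the toctree check
      if PySem.Str.startswith stripped ".. toctree::" then
        (st.1, some (PySem.Str.len line - PySem.Str.len stripped))
      else (st.1 ++ [line], none)
  | none =>
      if PySem.Str.startswith stripped ".. toctree::" then
        (st.1, some (PySem.Str.len line - PySem.Str.len stripped))
      else (st.1 ++ [line], none)

def strip_toctree_py (text : String) : String :=
  -- text.split("\n"): sep ≠ "", so split? is always some
  let lines := (PySem.Str.split? text "\n").getD []
  let st := lines.foldl stripToctreeStep ([], none)
  PySem.Str.join "\n" st.1

-- ===== PORT B =====
-- B's inner while-loop: add to `d` every j with j < n and lines[j] blank or more indented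
def altFill (lines : List String) (n indent : Int) (j : Int) (d : PySem.Set Int) : PySem.Set Int :=
  if h : j < n ∧ ((PySem.List.pyGetD lines j "") = "" ∨
      PySem.Str.len (PySem.List.pyGetD lines j "") -
        PySem.Str.len (PySem.Str.lstrip (PySem.List.pyGetD lines j "")) > indent) then
    altFill lines n indent (j + 1) (PySem.Set.add d j)
  else d
termination_by (n - j).toNat
decreasing_by omega

-- B's outer loop body (for i in range(n))
def altStep (lines : List String) (n : Int) (d : PySem.Set Int) (i : Int) : PySem.Set Int :=
  if PySem.Set.contains d i then d
  else
    let line := PySem.List.pyGetD lines i ""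
    let stripped := PySem.Str.lstrip line
    if PySem.Str.startswith stripped ".. toctree::" then
      altFill lines n (PySem.Str.len line - PySem.Str.len stripped) (i + 1) (PySem.Set.add d i)
    else d

def strip_toctree_py_alt (text : String) : String :=
  let lines := (PySem.Str.split? text "\n").getD []
  let n : Int := PySem.List.len lines
  let d := (PySem.List.pyRange 0 n 1).foldl (altStep lines n) PySem.Set.empty
  PySem.Str.join "\n"
    (((PySem.List.pyRange 0 n 1).filter (fun i => ! PySem.Set.contains d i)).map
      (fun i => PySem.List.pyGetD lines i ""))

-- ===== PRECONDITION & SPEC =====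
def Spec_strip_toctree_py (text : String) (out : String) : Prop := out = strip_toctree_py_alt text
instance (text : String) (out : String) : Decidable (Spec_strip_toctree_py text out) := by unfold Spec_strip_toctree_py; infer_instance

-- ===== CLAIM (what is proved, stated in full; the proofs are below) =====
def Claim_equal_strip_toctree_py : Prop := ∀ (text : String), Dom_strip_toctree_py text → Spec_strip_toctree_py text (strip_toctree_py text)

-- ===== LEMMAS AND PROOFS =====

-- proof-side mirror of the skipped block: drop the blank/more-indented prefix
def stripToctreeSkip (indent : Int) : List String → List String
  | [] => []
  | l :: rest =>
    if l = "" ∨ PySem.Str.len l - PySem.Str.len (PySem.Str.lstrip l) > indent then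
      stripToctreeSkip indent rest
    else l :: rest

theorem stripToctreeSkip_length_le (indent : Int) (ls : List String) :
    (stripToctreeSkip indent ls).length ≤ ls.length := by
  induction ls with
  | nil => simp [stripToctreeSkip]
  | cons l rest ih =>
    simp only [stripToctreeSkip]
    split
    · exact Nat.le_succ_of_le ih
    · simp

-- proof-side mirror of A's result as a structural recursion
def stripToctreeGo : List String → List String
  | [] => []
  | l :: rest =>
    let stripped := PySem.Str.lstrip l
    if PySem.Str.startswith stripped ".. toctree::" then
      stripToctreeGo (stripToctreeSkip (PySem.Str.len l - PySem.Str.len stripped) rest)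
    else l :: stripToctreeGo rest
termination_by ls => ls.length
decreasing_by
  · exact Nat.lt_succ_of_le (stripToctreeSkip_length_le _ _)
  · simp

-- A in the "skipping" state runs like A in the clean state on the block-stripped suffix
theorem foldl_step_some (n : Int) (ls : List String) (acc : List String) :
    (ls.foldl stripToctreeStep (acc, some n)).1 =
    ((stripToctreeSkip n ls).foldl stripToctreeStep (acc, none)).1 := by
  induction ls generalizing acc with
  | nil => simp [stripToctreeSkip]
  | cons l rest ih =>
    simp only [List.foldl_cons, stripToctreeSkip]
    by_cases h : l = "" ∨ PySem.Str.len l - PySem.Str.len (PySem.Str.lstrip l) > n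
    · rw [if_pos h]
      show (List.foldl stripToctreeStep (stripToctreeStep (acc, some n) l) rest).1 = _
      simp only [stripToctreeStep, if_pos h]
      exact ih acc
    · rw [if_neg h]
      show (List.foldl stripToctreeStep (stripToctreeStep (acc, some n) l) rest).1 =
           (List.foldl stripToctreeStep (stripToctreeStep (acc, none) l) rest).1
      simp only [stripToctreeStep, if_neg h]

-- A's clean-state fold produces the structural recursion's output
theorem foldl_step_none (ls : List String) (acc : List String) :
    (ls.foldl stripToctreeStep (acc, none)).1 = acc ++ stripToctreeGo ls := by
  induction hn : ls.length using Nat.strong_induction_on generalizing ls acc with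
  | _ n ih =>
    match ls with
    | [] => simp [stripToctreeGo]
    | l :: rest =>
      rw [stripToctreeGo, List.foldl_cons]
      by_cases h : PySem.Str.startswith (PySem.Str.lstrip l) ".. toctree::" = true
      · have hlen : (stripToctreeSkip (PySem.Str.len l - PySem.Str.len (PySem.Str.lstrip l)) rest).length < n := by
          subst hn
          exact Nat.lt_succ_of_le (stripToctreeSkip_length_le _ _)
        show (List.foldl stripToctreeStep (stripToctreeStep (acc, none) l) rest).1 = _
        simp only [stripToctreeStep, h, if_pos]
        rw [foldl_step_some, ih _ hlen _ _ rfl]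
      · have hlen : rest.length < n := by subst hn; simp
        show (List.foldl stripToctreeStep (stripToctreeStep (acc, none) l) rest).1 = _
        simp only [stripToctreeStep, h, if_false, Bool.false_eq_true]
        rw [ih _ hlen _ _ rfl]
        simp

-- number of lines the inner fill loop consumes, starting at position j
def fillLen (L : List String) (ind : Int) (j : Nat) : Nat :=
  (L.drop j).length - (stripToctreeSkip ind (L.drop j)).length

-- spec of B's kept indices: the indices stripToctreeGo would keep, from cursor p
def keptIdx (L : List String) (p : Nat) : List Nat :=
  if h : p < L.length then
    let l := L.getD p ""
    let s := PySem.Str.lstrip l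
    if PySem.Str.startswith s ".. toctree::" then
      keptIdx L (p + 1 + fillLen L (PySem.Str.len l - PySem.Str.len s) (p + 1))
    else p :: keptIdx L (p + 1)
  else []
termination_by L.length - p
decreasing_by
  · omega
  · omega


-- the skipped block is a prefix: stripToctreeSkip returns a suffix (by drop) of its input
theorem stripToctreeSkip_eq_drop (ind : Int) (ls : List String) :
    stripToctreeSkip ind ls = ls.drop (ls.length - (stripToctreeSkip ind ls).length) := by
  induction ls with
  | nil => simp [stripToctreeSkip]
  | cons l rest ih =>
    simp only [stripToctreeSkip]
    by_cases h : l = "" ∨ PySem.Str.len l - PySem.Str.len (PySem.Str.lstrip l) > ind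
    · rw [if_pos h]
      have hle := stripToctreeSkip_length_le ind rest
      have : (l :: rest).length - (stripToctreeSkip ind rest).length
           = (rest.length - (stripToctreeSkip ind rest).length) + 1 := by
        simp only [List.length_cons]; omega
      rw [this, List.drop_succ_cons]
      exact ih
    · rw [if_neg h]
      simp

theorem drop_eq_getD_cons (L : List String) (p : Nat) (h : p < L.length) :
    L.drop p = L.getD p "" :: L.drop (p + 1) := by
  rw [List.drop_eq_getElem_cons h, List.getD_eq_getElem L "" h]

theorem fillLen_le (L : List String) (ind : Int) (j : Nat) :
    fillLen L ind j ≤ L.length - j := by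
  have := stripToctreeSkip_length_le ind (L.drop j)
  simp only [fillLen]
  have : (L.drop j).length = L.length - j := List.length_drop
  omega

-- characterization of the inner fill loop: it adds exactly the interval [j, j + fillLen)
theorem altFill_mem (L : List String) (ind : Int) : ∀ (j : Nat) (d : PySem.Set Int) (k : Int),
    k ∈ altFill L (L.length : Int) ind (j : Int) d ↔
      (k ∈ d ∨ ((j : Int) ≤ k ∧ k < (j : Int) + fillLen L ind j)) := by
  intro j
  induction hm : L.length - j using Nat.strong_induction_on generalizing j with
  | _ m ih =>
    intro d k
    rw [altFill]
    by_cases hj : j < L.length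
    · have hdrop := drop_eq_getD_cons L j hj
      set l := L.getD j "" with hl
      by_cases hc : l = "" ∨ PySem.Str.len l - PySem.Str.len (PySem.Str.lstrip l) > ind
      · rw [dif_pos ⟨by exact_mod_cast hj, by
          simpa [PySem.List.pyGetD_natCast, ← hl] using hc⟩]
        have hcast : (j : Int) + 1 = ((j + 1 : Nat) : Int) := by push_cast; ring
        rw [hcast, ih (L.length - (j + 1)) (by omega) (j + 1) rfl]
        have hfl : fillLen L ind j = fillLen L ind (j + 1) + 1 := by
          simp only [fillLen, hdrop, stripToctreeSkip, if_pos hc]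
          have := stripToctreeSkip_length_le ind (L.drop (j + 1))
          simp only [List.length_cons]; omega
        rw [hfl, PySem.Set.mem_add]
        constructor
        · rintro ((hd | hk) | hiv)
          · exact Or.inl hd
          · refine Or.inr ⟨by omega, by push_cast; omega⟩
          · refine Or.inr ⟨by push_cast at hiv ⊢; omega, by push_cast at hiv ⊢; omega⟩
        · rintro (hd | ⟨h1, h2⟩)
          · exact Or.inl (Or.inl hd)
          · by_cases hk : k = (j : Int)
            · exact Or.inl (Or.inr hk)
            · refine Or.inr ⟨by push_cast at h1 h2 ⊢; omega, by push_cast at h1 h2 ⊢; omega⟩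
      · rw [dif_neg (by
          push Not
          intro _
          simpa [PySem.List.pyGetD_natCast, ← hl] using hc)]
        have hfl : fillLen L ind j = 0 := by
          simp only [fillLen, hdrop, stripToctreeSkip, if_neg hc]
          omega
        rw [hfl]
        constructor
        · exact fun hd => Or.inl hd
        · rintro (hd | ⟨h1, h2⟩)
          · exact hd
          · omega
    · rw [dif_neg (by push Not; intro h; exfalso; exact hj (by exact_mod_cast h))]
      have hfl : fillLen L ind j = 0 := by
        simp only [fillLen, List.drop_eq_nil_of_le (by omega : L.length ≤ j), stripToctreeSkip]
        simp
      rw [hfl]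
      constructor
      · exact fun hd => Or.inl hd
      · rintro (hd | ⟨h1, h2⟩)
        · exact hd
        · omega

-- every kept index is at least the cursor
theorem keptIdx_ge (L : List String) : ∀ (p : Nat) (m : Nat), m ∈ keptIdx L p → p ≤ m := by
  intro p
  induction hm : L.length - p using Nat.strong_induction_on generalizing p with
  | _ n ih =>
    intro m hmem
    rw [keptIdx] at hmem
    by_cases hp : p < L.length
    · rw [dif_pos hp] at hmem
      by_cases hc : PySem.Str.startswith (PySem.Str.lstrip (L.getD p "")) ".. toctree::" = true
      · rw [if_pos hc] at hmem
        have := ih (L.length - (p + 1 + fillLen L (PySem.Str.len (L.getD p "") - PySem.Str.len (PySem.Str.lstrip (L.getD p ""))) (p + 1))) (by omega) _ rfl m hmem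
        omega
      · rw [if_neg hc] at hmem
        rcases List.mem_cons.mp hmem with h | h
        · omega
        · have := ih (L.length - (p + 1)) (by omega) (p + 1) rfl m h
          omega
    · rw [dif_neg hp] at hmem
      simp at hmem


-- characterization of B's outer fold: starting at cursor i with frontier f (indices ≥ i in d are
-- exactly [i, f)), the final set drops exactly the non-kept indices of [i, n)
theorem altFold_mem (L : List String) : ∀ (i f : Nat) (d : PySem.Set Int),
    i ≤ f → f ≤ L.length →
    (∀ k : Int, (i : Int) ≤ k → (k ∈ d ↔ k < (f : Int))) →
    ∀ k : Int,
      (k ∈ (PySem.List.pyRange (i : Int) (L.length : Int) 1).foldl (altStep L (L.length : Int)) d ↔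
        (k ∈ d ∨ ((i : Int) ≤ k ∧ k < (L.length : Int) ∧ ¬ ∃ m ∈ keptIdx L f, (m : Int) = k))) := by
  intro i
  induction hm : L.length - i using Nat.strong_induction_on generalizing i with
  | _ n ih =>
    intro f d hif hfn Hup k
    by_cases hi : i < L.length
    · rw [PySem.List.pyRange_one_cons (by exact_mod_cast hi), List.foldl_cons]
      have hcast : (i : Int) + 1 = ((i + 1 : Nat) : Int) := by push_cast; ring
      by_cases hif' : i < f
      · -- i already dropped: step is the identity
        have hdi : (i : Int) ∈ d := (Hup i le_rfl).mpr (by exact_mod_cast hif')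
        have hstep : altStep L (L.length : Int) d (i : Int) = d := by
          simp only [altStep, PySem.Set.contains_iff]
          rw [if_pos hdi]
        rw [hstep, hcast, ih (L.length - (i + 1)) (by omega) (i + 1) rfl f d
          (by omega) hfn (fun k hk => Hup k (by push_cast at hk ⊢; omega)) k]
        have hnk : ¬ ∃ m ∈ keptIdx L f, (m : Int) = (i : Int) := by
          rintro ⟨m, hmem, hmk⟩
          have h1 := keptIdx_ge L f m hmem
          have h2 : m = i := by exact_mod_cast hmk
          omega
        constructor
        · rintro (hd | ⟨h1, h2, h3⟩)
          · exact Or.inl hd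
          · exact Or.inr ⟨by push_cast at h1 ⊢; omega, h2, h3⟩
        · rintro (hd | ⟨h1, h2, h3⟩)
          · exact Or.inl hd
          · by_cases hk : k = (i : Int)
            · exact Or.inl (hk ▸ hdi)
            · exact Or.inr ⟨by push_cast at h1 ⊢; omega, h2, h3⟩
      · -- i = f: the cursor is at the frontier, line i is examined
        have hf : f = i := by omega
        rw [hf] at hfn Hup ⊢
        have hdi : ¬ (i : Int) ∈ d := fun h => by
          have := (Hup i le_rfl).mp h; omega
        have hgetd : PySem.List.pyGetD L (i : Int) "" = L.getD i "" := by
          simp [PySem.List.pyGetD_natCast]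
        set l := L.getD i "" with hl
        by_cases hmk : PySem.Str.startswith (PySem.Str.lstrip l) ".. toctree::" = true
        · -- marker line: fill [i+1, i+1+s), then continue with frontier i+1+s
          set ind := PySem.Str.len l - PySem.Str.len (PySem.Str.lstrip l) with hind
          set s := fillLen L ind (i + 1) with hs
          have hsle : s ≤ L.length - (i + 1) := fillLen_le L ind (i + 1)
          have hstep : altStep L (L.length : Int) d (i : Int) =
              altFill L (L.length : Int) ind ((i + 1 : Nat) : Int) (PySem.Set.add d (i : Int)) := by
            simp only [altStep, PySem.Set.contains_iff, hgetd]
            rw [if_neg hdi, if_pos hmk, hcast, hind]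
          have hmemd' : ∀ k : Int,
              k ∈ altFill L (L.length : Int) ind ((i + 1 : Nat) : Int) (PySem.Set.add d (i : Int)) ↔
                (k ∈ d ∨ ((i : Int) ≤ k ∧ k < ((i + 1 + s : Nat) : Int))) := by
            intro k'
            rw [altFill_mem L ind (i + 1) _ k', PySem.Set.mem_add]
            constructor
            · rintro ((hd | hk) | ⟨h1, h2⟩)
              · exact Or.inl hd
              · exact Or.inr ⟨le_of_eq hk.symm, by push_cast; omega⟩
              · exact Or.inr ⟨by push_cast at h1 ⊢; omega, by push_cast at h1 h2 ⊢; omega⟩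
            · rintro (hd | ⟨h1, h2⟩)
              · exact Or.inl (Or.inl hd)
              · by_cases hk : k' = (i : Int)
                · exact Or.inl (Or.inr hk)
                · exact Or.inr ⟨by push_cast at h1 h2 ⊢; omega, by push_cast at h1 h2 ⊢; omega⟩
          have hkept : keptIdx L i = keptIdx L (i + 1 + s) := by
            rw [keptIdx, dif_pos hi, if_pos (by exact hmk)]
          rw [hstep, hcast, ih (L.length - (i + 1)) (by omega) (i + 1) rfl (i + 1 + s) _
            (by omega) (by omega)
            (fun k' hk' => by
              rw [hmemd' k']
              constructor
              · rintro (hd | ⟨h1, h2⟩)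
                · have := (Hup k' (by push_cast at hk' ⊢; omega)).mp hd
                  push_cast at hk' ⊢; omega
                · exact h2
              · intro hlt
                exact Or.inr ⟨by push_cast at hk' ⊢; omega, hlt⟩) k,
            hmemd' k, hkept]
          have hge : ∀ m ∈ keptIdx L (i + 1 + s), i + 1 + s ≤ m := keptIdx_ge L (i + 1 + s)
          constructor
          · rintro ((hd | ⟨h1, h2⟩) | ⟨h1, h2, h3⟩)
            · exact Or.inl hd
            · refine Or.inr ⟨h1, by push_cast at h2 ⊢; omega, ?_⟩
              rintro ⟨m, hmem, hmk'⟩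
              have := hge m hmem
              push_cast at h2 hmk' ⊢; omega
            · exact Or.inr ⟨by push_cast at h1 ⊢; omega, h2, h3⟩
          · rintro (hd | ⟨h1, h2, h3⟩)
            · exact Or.inl (Or.inl hd)
            · by_cases hk : k < ((i + 1 + s : Nat) : Int)
              · exact Or.inl (Or.inr ⟨h1, hk⟩)
              · exact Or.inr ⟨by push_cast at hk ⊢; omega, h2, h3⟩
        · -- ordinary line: kept; step is the identity, frontier moves to i+1
          have hstep : altStep L (L.length : Int) d (i : Int) = d := by
            simp only [altStep, PySem.Set.contains_iff]
            rw [if_neg hdi, hgetd, if_neg hmk]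
          have hkept : keptIdx L i = i :: keptIdx L (i + 1) := by
            rw [keptIdx, dif_pos hi, if_neg (by exact hmk)]
          rw [hstep, hcast, ih (L.length - (i + 1)) (by omega) (i + 1) rfl (i + 1) d
            (by omega) (by omega)
            (fun k' hk' => by
              constructor
              · intro hd
                have := (Hup k' (by push_cast at hk' ⊢; omega)).mp hd
                push_cast at hk' ⊢; omega
              · intro hlt
                exfalso; push_cast at hk' hlt; omega) k, hkept]
          have hge : ∀ m ∈ keptIdx L (i + 1), i + 1 ≤ m := keptIdx_ge L (i + 1)
          constructor
          · rintro (hd | ⟨h1, h2, h3⟩)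
            · exact Or.inl hd
            · refine Or.inr ⟨by push_cast at h1 ⊢; omega, h2, ?_⟩
              rintro ⟨m, hmem, hmk'⟩
              rcases List.mem_cons.mp hmem with hm1 | hm2
              · subst hm1; push_cast at h1 hmk'; omega
              · exact h3 ⟨m, hm2, hmk'⟩
          · rintro (hd | ⟨h1, h2, h3⟩)
            · exact Or.inl hd
            · by_cases hk : k = (i : Int)
              · exfalso
                exact h3 ⟨i, List.mem_cons_self, hk.symm⟩
              · refine Or.inr ⟨by push_cast at h1 ⊢; omega, h2, ?_⟩
                rintro ⟨m, hmem, hmk'⟩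
                exact h3 ⟨m, List.mem_cons_of_mem _ hmem, hmk'⟩
    · -- i ≥ n: empty range, empty kept list
      have hi' : i = L.length ∨ L.length < i := by omega
      have hrange : PySem.List.pyRange (i : Int) (L.length : Int) 1 = [] := by
        simp [PySem.List.pyRange_one]
        omega
      have hf : f = L.length := by omega
      have hkept : keptIdx L f = [] := by
        rw [keptIdx, dif_neg (by omega)]
      rw [hrange, List.foldl_nil, hkept]
      constructor
      · exact fun hd => Or.inl hd
      · rintro (hd | ⟨h1, h2, h3⟩)
        · exact hd
        · exfalso; omega


-- mapping the kept indices through the lines reproduces the structural recursion's output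
theorem keptIdx_map_get (L : List String) : ∀ (p : Nat), p ≤ L.length →
    List.map (fun i => PySem.List.pyGetD L i "") (List.map (fun m => ((m : Nat) : Int)) (keptIdx L p)) = stripToctreeGo (L.drop p) := by
  intro p
  induction hm : L.length - p using Nat.strong_induction_on generalizing p with
  | _ n ih =>
    intro hp
    by_cases hlt : p < L.length
    · have hdrop := drop_eq_getD_cons L p hlt
      set l := L.getD p "" with hl
      rw [keptIdx, dif_pos hlt, hdrop, stripToctreeGo]
      by_cases hmk : PySem.Str.startswith (PySem.Str.lstrip l) ".. toctree::" = true
      · rw [if_pos (by exact hmk), if_pos hmk]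
        set ind := PySem.Str.len l - PySem.Str.len (PySem.Str.lstrip l) with hind
        have hskip : stripToctreeSkip ind (L.drop (p + 1)) = L.drop (p + 1 + fillLen L ind (p + 1)) := by
          rw [stripToctreeSkip_eq_drop ind (L.drop (p + 1)), List.drop_drop]
          congr 1
          try simp only [fillLen, List.length_drop]
          try omega
        have hle := fillLen_le L ind (p + 1)
        rw [hskip, ih (L.length - (p + 1 + fillLen L ind (p + 1))) (by omega) _ rfl (by omega)]
      · rw [if_neg (by exact hmk), if_neg hmk]
        simp only [List.map_cons]
        have hpg : PySem.List.pyGetD L ((p : Nat) : Int) "" = l := by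
          simp only [PySem.List.pyGetD_natCast]
          exact hl.symm
        rw [hpg, ih (L.length - (p + 1)) (by omega) (p + 1) rfl (by omega)]
    · rw [keptIdx, dif_neg hlt, List.drop_eq_nil_of_le (by omega), stripToctreeGo]
      simp

-- range suffixes are sublists
theorem pyRange_suffix_sublist (n : Nat) : ∀ (c a : Nat), a ≤ a + c →
    (PySem.List.pyRange ((a + c : Nat) : Int) (n : Int) 1).Sublist
      (PySem.List.pyRange ((a : Nat) : Int) (n : Int) 1) := by
  intro c
  induction c with
  | zero => intro a _; simp
  | succ c ihc =>
    intro a _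
    by_cases ha : a < n
    · rw [PySem.List.pyRange_one_cons (a := ((a : Nat) : Int)) (b := (n : Int)) (by exact_mod_cast ha)]
      have : ((a : Nat) : Int) + 1 = ((a + 1 : Nat) : Int) := by push_cast; ring
      rw [this]
      have h2 : (a + 1) + c = a + (c + 1) := by omega
      exact List.Sublist.cons _ (h2 ▸ ihc (a + 1) (by omega))
    · have h1 : PySem.List.pyRange ((a : Nat) : Int) (n : Int) 1 = [] := by
        simp [PySem.List.pyRange_one]; omega
      have h2 : PySem.List.pyRange ((a + (c + 1) : Nat) : Int) (n : Int) 1 = [] := by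
        simp [PySem.List.pyRange_one]; omega
      rw [h1, h2]

-- the kept indices form a sublist of the index range
theorem keptIdx_sublist (L : List String) : ∀ (p : Nat),
    (List.map (fun m => ((m : Nat) : Int)) (keptIdx L p)).Sublist
      (PySem.List.pyRange ((p : Nat) : Int) ((L.length : Nat) : Int) 1) := by
  intro p
  induction hm : L.length - p using Nat.strong_induction_on generalizing p with
  | _ n ih =>
    by_cases hlt : p < L.length
    · rw [keptIdx, dif_pos hlt]
      set l := L.getD p "" with hl
      by_cases hmk : PySem.Str.startswith (PySem.Str.lstrip l) ".. toctree::" = true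
      · rw [if_pos (by exact hmk)]
        set ind := PySem.Str.len l - PySem.Str.len (PySem.Str.lstrip l) with hind
        set s := fillLen L ind (p + 1) with hs
        have hle := fillLen_le L ind (p + 1)
        have h1 := ih (L.length - (p + 1 + s)) (by omega) (p + 1 + s) rfl
        have h2 := pyRange_suffix_sublist L.length (1 + s) p (by omega)
        have h3 : p + (1 + s) = p + 1 + s := by omega
        exact h1.trans (h3 ▸ h2)
      · rw [if_neg (by exact hmk), List.map_cons]
        rw [PySem.List.pyRange_one_cons (b := ((L.length : Nat) : Int)) (by exact_mod_cast hlt)]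
        have : ((p : Nat) : Int) + 1 = ((p + 1 : Nat) : Int) := by push_cast; ring
        rw [this]
        exact List.Sublist.cons₂ _ (ih (L.length - (p + 1)) (by omega) (p + 1) rfl)
    · rw [keptIdx, dif_neg hlt]
      simp

theorem pyRange_one_nodup (a b : Int) : (PySem.List.pyRange a b 1).Nodup := by
  rw [PySem.List.pyRange_one]
  refine List.Nodup.map ?_ List.nodup_range
  intro x y h
  simp only [add_right_inj, Nat.cast_inj] at h
  exact h

-- filtering a duplicate-free list by membership in a sublist gives back the sublist
theorem filter_mem_of_sublist {l r : List Int} (h : l.Sublist r) (hr : r.Nodup) :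
    r.filter (fun x => decide (x ∈ l)) = l := by
  induction h with
  | slnil => simp
  | @cons l1 l2 a h ih =>
    have hnd := List.nodup_cons.mp hr
    have hna : a ∉ l1 := fun hal => hnd.1 (h.subset hal)
    rw [List.filter_cons, if_neg (by simp [hna]), ih hnd.2]
  | @cons₂ l1 l2 a h ih =>
    have hnd := List.nodup_cons.mp hr
    rw [List.filter_cons, if_pos (by simp)]
    congr 1
    have hcg : List.filter (fun x => decide (x ∈ a :: l1)) l2
             = List.filter (fun x => decide (x ∈ l1)) l2 :=
      List.filter_congr (fun x hx => by
        have hxa : x ≠ a := fun he => hnd.1 (he ▸ hx)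
        simp [List.mem_cons, hxa])
    rw [hcg, ih hnd.2]

-- ===== VERDICT (by name: the statement is the Claim_ definition above) =====
theorem strip_toctree_py_spec : Claim_equal_strip_toctree_py := by
  intro text _
  show strip_toctree_py text = strip_toctree_py_alt text
  set L := (PySem.Str.split? text "\n").getD [] with hL
  have hA : strip_toctree_py text = PySem.Str.join "\n" ((L.foldl stripToctreeStep ([], none)).1) := rfl
  have hB : strip_toctree_py_alt text = PySem.Str.join "\n"
      (((PySem.List.pyRange 0 (PySem.List.len L) 1).filter
          (fun i => ! PySem.Set.contains
            ((PySem.List.pyRange 0 (PySem.List.len L) 1).foldl (altStep L (PySem.List.len L)) PySem.Set.empty) i)).map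
        (fun i => PySem.List.pyGetD L i "")) := rfl
  rw [hA, hB, foldl_step_none, List.nil_append]
  have hlen : PySem.List.len L = (L.length : Int) := by simp [PySem.List.len_eq]
  rw [hlen]
  set dfin := (PySem.List.pyRange 0 (L.length : Int) 1).foldl (altStep L (L.length : Int)) PySem.Set.empty with hdf
  have hchar : ∀ k : Int, k ∈ dfin ↔ ((0 : Int) ≤ k ∧ k < (L.length : Int) ∧ ¬ ∃ m ∈ keptIdx L 0, (m : Int) = k) := by
    intro k
    have h0 : ∀ k : Int, ((0 : Nat) : Int) ≤ k → ((k ∈ (PySem.Set.empty : PySem.Set Int)) ↔ k < ((0 : Nat) : Int)) := by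
      intro k hk
      constructor
      · intro h; exact absurd h (by simp [PySem.Set.empty])
      · intro h; exfalso; push_cast at hk h; omega
    have hfm := altFold_mem L 0 0 PySem.Set.empty le_rfl (Nat.zero_le _) h0 k
    simp only [Nat.cast_zero] at hfm
    rw [hdf, hfm]
    constructor
    · rintro (hd | h)
      · exact absurd hd (by simp [PySem.Set.empty])
      · exact h
    · exact fun h => Or.inr h
  have hfilter : (PySem.List.pyRange 0 (L.length : Int) 1).filter (fun i => ! PySem.Set.contains dfin i)
      = List.map (fun m => ((m : Nat) : Int)) (keptIdx L 0) := by
    have hsub := keptIdx_sublist L 0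
    simp only [Nat.cast_zero] at hsub
    rw [← filter_mem_of_sublist hsub (pyRange_one_nodup 0 (L.length : Int))]
    apply List.filter_congr
    intro x hx
    have hxr := PySem.List.mem_pyRange_one.mp hx
    rw [Bool.eq_iff_iff]
    by_cases hmem : x ∈ List.map (fun m => ((m : Nat) : Int)) (keptIdx L 0)
    · have hnx : x ∉ dfin := by
        intro hin
        rcases (hchar x).mp hin with ⟨_, _, h3⟩
        rcases List.mem_map.mp hmem with ⟨m, hm, hmx⟩
        exact h3 ⟨m, hm, hmx⟩
      simp [hnx, hmem]
    · have hin : x ∈ dfin := (hchar x).mpr ⟨hxr.1, hxr.2,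
        fun he => hmem (List.mem_map.mpr ⟨he.choose, he.choose_spec.1, he.choose_spec.2⟩)⟩
      simp [hin, hmem]
  rw [hfilter, keptIdx_map_get L 0 (Nat.zero_le _), List.drop_zero]
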